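-- pv_equiv track=rewrite | github.com/UjjwalGupta49/junior | scripts/advanced_placeholder_matcher.py | _filter_content_shapes
-- ===== SOURCE A (Python) =====
-- from typing import Dict, List, Tuple, Optional, Set
--
-- def _filter_content_shapes(slide_data: Dict) -> List[Dict]:
--     """Filter shapes to exclude only SLIDE_NUMBER placeholders - include all others"""
--     content_shapes = []
--     for shape_data in slide_data.get("shapes", []):
--         placeholder_type = shape_data.get("placeholder_type", "")
--
--         # Skip only SLIDE_NUMBER placeholders - include everything else
--         if placeholder_type != "SLIDE_NUMBER":
--             content_shapes.append(shape_data)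
--
--     # Sort by priority: TITLE first, then OBJECT, then others
--     def priority(shape):
--         placeholder_type = shape.get("placeholder_type", "")
--         if placeholder_type == "TITLE":
--             return 0
--         elif placeholder_type == "OBJECT":
--             return 1
--         else:
--             return 2  # All other types (SUBTITLE, BODY, etc.)
--
--     return sorted(content_shapes, key=priority)
-- ===== SOURCE B (Python) =====
-- from typing import Dict, List
--
--
-- def _filter_content_shapes(slide_data: Dict) -> List[Dict]:
--     """One-pass bucket distribution: TITLE shapes, then OBJECT shapes, then the rest
--     (SLIDE_NUMBER shapes dropped); stable by construction, no sort call."""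
--     titles: List[Dict] = []
--     objects: List[Dict] = []
--     others: List[Dict] = []
--     for shape_data in slide_data.get("shapes", []):
--         placeholder_type = shape_data.get("placeholder_type", "")
--         if placeholder_type == "SLIDE_NUMBER":
--             continue
--         if placeholder_type == "TITLE":
--             titles.append(shape_data)
--         elif placeholder_type == "OBJECT":
--             objects.append(shape_data)
--         else:
--             others.append(shape_data)
--     return titles + objects + others
-- ===== Notes on version B (the rewrite author's own statement) =====
-- stated objective: alternative
-- what changed: Replaces filter-then-stable-sort with a single pass that distributes shapes into three priority buckets (TITLE/OBJECT/other, skipping SLIDE_NUMBER) and concatenates them, removing the sort entirely.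
import Mathlib
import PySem

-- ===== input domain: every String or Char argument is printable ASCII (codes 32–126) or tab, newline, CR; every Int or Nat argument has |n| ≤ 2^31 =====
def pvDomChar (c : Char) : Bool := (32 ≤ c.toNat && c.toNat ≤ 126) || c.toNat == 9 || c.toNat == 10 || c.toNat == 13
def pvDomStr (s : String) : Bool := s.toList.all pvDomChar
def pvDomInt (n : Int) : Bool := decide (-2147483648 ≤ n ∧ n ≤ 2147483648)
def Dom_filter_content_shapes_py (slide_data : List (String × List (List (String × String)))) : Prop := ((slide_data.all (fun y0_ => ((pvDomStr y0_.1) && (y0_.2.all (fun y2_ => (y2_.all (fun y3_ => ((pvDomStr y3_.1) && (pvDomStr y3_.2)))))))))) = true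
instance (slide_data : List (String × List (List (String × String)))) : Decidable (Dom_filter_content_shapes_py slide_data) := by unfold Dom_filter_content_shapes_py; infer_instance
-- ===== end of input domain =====

-- ===== PORT A =====
-- B replaces A's filter-then-stable-sort with a one-pass three-bucket distribution (objective: alternative decomposition, no sort).
-- shared helper: Python's shape.get(key, default) on an association list (first match)
def pvGet (d : List (String × String)) (k dflt : String) : String :=
  PySem.Dict.getD (PySem.Dict.mk d) k dflt

-- A's `priority` key function
def pvPriorityA (shape : List (String × String)) : Int :=
  let placeholder_type := pvGet shape "placeholder_type" ""
  if placeholder_type = "TITLE" then 0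
  else if placeholder_type = "OBJECT" then 1
  else 2

def filter_content_shapes_py (slide_data : List (String × List (List (String × String)))) : List (List (String × String)) :=
  let shapes := PySem.Dict.getD (PySem.Dict.mk slide_data) "shapes" []
  let content_shapes := shapes.foldl
    (fun acc shape_data =>
      if pvGet shape_data "placeholder_type" "" ≠ "SLIDE_NUMBER" then acc ++ [shape_data] else acc) []
  PySem.List.sorted content_shapes pvPriorityA

-- ===== PORT B =====
def filter_content_shapes_py_alt (slide_data : List (String × List (List (String × String)))) : List (List (String × String)) :=
  let shapes := PySem.Dict.getD (PySem.Dict.mk slide_data) "shapes" []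
  let buckets := shapes.foldl
    (fun (acc : List (List (String × String)) × List (List (String × String)) × List (List (String × String))) shape_data =>
      let placeholder_type := pvGet shape_data "placeholder_type" ""
      if placeholder_type = "SLIDE_NUMBER" then acc
      else if placeholder_type = "TITLE" then (acc.1 ++ [shape_data], acc.2.1, acc.2.2)
      else if placeholder_type = "OBJECT" then (acc.1, acc.2.1 ++ [shape_data], acc.2.2)
      else (acc.1, acc.2.1, acc.2.2 ++ [shape_data]))
    ([], [], [])
  buckets.1 ++ buckets.2.1 ++ buckets.2.2

-- ===== PRECONDITION & SPEC =====
def Spec_filter_content_shapes_py (slide_data : List (String × List (List (String × String)))) (out : List (List (String × String))) : Prop := out = filter_content_shapes_py_alt slide_data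
instance (slide_data : List (String × List (List (String × String)))) (out : List (List (String × String))) : Decidable (Spec_filter_content_shapes_py slide_data out) := by unfold Spec_filter_content_shapes_py; infer_instance

-- ===== CLAIM (what is proved, stated in full; the proofs are below) =====
def Claim_equal_filter_content_shapes_py : Prop := ∀ (slide_data : List (String × List (List (String × String)))), Dom_filter_content_shapes_py slide_data → Spec_filter_content_shapes_py slide_data (filter_content_shapes_py slide_data)

-- ===== LEMMAS AND PROOFS =====

-- inserting an element that sorts before everything in ys puts it in front
theorem pv_insert_all (before : List (String × String) → List (String × String) → Bool)
    (x : List (String × String)) (ys : List (List (String × String)))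
    (h : ∀ y ∈ ys, before x y = true) :
    PySem.List.insertBy before x ys = x :: ys := by
  cases ys with
  | nil => rfl
  | cons y ys => simp [PySem.List.insertBy, h y (by simp)]

-- inserting an element that does not sort before anything in pre skips pre
theorem pv_insert_skip (before : List (String × String) → List (String × String) → Bool)
    (x : List (String × String)) (pre post : List (List (String × String)))
    (h : ∀ y ∈ pre, before x y = false) :
    PySem.List.insertBy before x (pre ++ post) = pre ++ PySem.List.insertBy before x post := by
  induction pre with
  | nil => rfl
  | cons p ps ih =>
    simp only [List.cons_append, PySem.List.insertBy, h p (by simp)]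
    simp only [Bool.false_eq_true, if_false]
    rw [ih (fun y hy => h y (by simp [hy]))]

theorem pv_key_cases (x : List (String × String)) :
    pvPriorityA x = 0 ∨ pvPriorityA x = 1 ∨ pvPriorityA x = 2 := by
  unfold pvPriorityA; dsimp only; split_ifs <;> simp

-- invariant of A's insertion-sort fold: three sorted buckets, appended in order
theorem pv_foldA_inv (xs b0 b1 b2 : List (List (String × String)))
    (h0 : ∀ y ∈ b0, pvPriorityA y = 0) (h1 : ∀ y ∈ b1, pvPriorityA y = 1)
    (h2 : ∀ y ∈ b2, pvPriorityA y = 2) :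
    xs.foldl (fun acc x => PySem.List.insertBy (fun a b => decide (pvPriorityA a < pvPriorityA b)) x acc) (b0 ++ b1 ++ b2)
      = (b0 ++ xs.filter (fun x => decide (pvPriorityA x = 0)))
        ++ (b1 ++ xs.filter (fun x => decide (pvPriorityA x = 1)))
        ++ (b2 ++ xs.filter (fun x => decide (pvPriorityA x = 2))) := by
  induction xs generalizing b0 b1 b2 with
  | nil => simp
  | cons x xs ih =>
    simp only [List.foldl_cons, List.filter_cons]
    rcases pv_key_cases x with h | h | h
    · rw [List.append_assoc,
          pv_insert_skip _ _ _ _ (fun y hy => by simp [h, h0 y hy]),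
          pv_insert_all _ _ _ (fun y hy => by
            rcases List.mem_append.mp hy with hy | hy
            · simp [h, h1 y hy]
            · simp [h, h2 y hy])]
      have e : b0 ++ x :: (b1 ++ b2) = (b0 ++ [x]) ++ b1 ++ b2 := by simp
      rw [e, ih (b0 ++ [x]) b1 b2
            (fun y hy => by
              rcases List.mem_append.mp hy with hy | hy
              · exact h0 y hy
              · simp only [List.mem_singleton] at hy; subst hy; exact h) h1 h2]
      simp [h]
    · rw [pv_insert_skip _ _ _ _ (fun y hy => by
            rcases List.mem_append.mp hy with hy | hy
            · simp [h, h0 y hy]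
            · simp [h, h1 y hy]),
          pv_insert_all _ _ _ (fun y hy => by simp [h, h2 y hy])]
      have e : (b0 ++ b1) ++ x :: b2 = b0 ++ (b1 ++ [x]) ++ b2 := by simp
      rw [e, ih b0 (b1 ++ [x]) b2 h0
            (fun y hy => by
              rcases List.mem_append.mp hy with hy | hy
              · exact h1 y hy
              · simp only [List.mem_singleton] at hy; subst hy; exact h) h2]
      simp [h]
    · rw [PySem.List.insertBy_of_forall_not_before _ _ _ (fun y hy => by
            rcases List.mem_append.mp hy with hy | hy
            · rcases List.mem_append.mp hy with hy | hy
              · simp [h, h0 y hy]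
              · simp [h, h1 y hy]
            · simp [h, h2 y hy])]
      have e : (b0 ++ b1 ++ b2) ++ [x] = b0 ++ b1 ++ (b2 ++ [x]) := by simp
      rw [e, ih b0 b1 (b2 ++ [x]) h0 h1
            (fun y hy => by
              rcases List.mem_append.mp hy with hy | hy
              · exact h2 y hy
              · simp only [List.mem_singleton] at hy; subst hy; exact h)]
      simp [h]

-- invariant of B's single bucket-distribution pass
theorem pv_foldB_inv (xs t o r : List (List (String × String))) :
    xs.foldl
      (fun (acc : List (List (String × String)) × List (List (String × String)) × List (List (String × String))) shape_data =>
        let placeholder_type := pvGet shape_data "placeholder_type" ""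
        if placeholder_type = "SLIDE_NUMBER" then acc
        else if placeholder_type = "TITLE" then (acc.1 ++ [shape_data], acc.2.1, acc.2.2)
        else if placeholder_type = "OBJECT" then (acc.1, acc.2.1 ++ [shape_data], acc.2.2)
        else (acc.1, acc.2.1, acc.2.2 ++ [shape_data])) (t, o, r)
      = (t ++ xs.filter (fun s => decide (pvGet s "placeholder_type" "" = "TITLE")),
         o ++ xs.filter (fun s => decide (pvGet s "placeholder_type" "" = "OBJECT")),
         r ++ xs.filter (fun s => decide (pvGet s "placeholder_type" "" ≠ "SLIDE_NUMBER" ∧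
                pvGet s "placeholder_type" "" ≠ "TITLE" ∧ pvGet s "placeholder_type" "" ≠ "OBJECT"))) := by
  induction xs generalizing t o r with
  | nil => simp
  | cons x xs ih =>
    simp only [List.foldl_cons, List.filter_cons]
    by_cases hS : pvGet x "placeholder_type" "" = "SLIDE_NUMBER"
    · have hT : ¬ pvGet x "placeholder_type" "" = "TITLE" := by rw [hS]; decide
      have hO : ¬ pvGet x "placeholder_type" "" = "OBJECT" := by rw [hS]; decide
      simp only [hS, if_true, ih, hT, hS, decide_eq_true_eq]
      simp [hT, hO, hS]
    · by_cases hT : pvGet x "placeholder_type" "" = "TITLE"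
      · have hO : ¬ pvGet x "placeholder_type" "" = "OBJECT" := by rw [hT]; decide
        simp only [hS, if_false, hT, if_true, ih, List.append_assoc]
        simp [hT, hS, hO]
      · by_cases hO : pvGet x "placeholder_type" "" = "OBJECT"
        · simp only [hS, hT, if_false, hO, if_true, ih, List.append_assoc]
          simp [hT, hS, hO]
        · simp only [hS, hT, hO, if_false, ih, List.append_assoc]
          simp [hT, hS, hO]

-- the three buckets match A's filtered priority classes
theorem pv_bucket0 (l : List (List (String × String))) :
    (l.filter (fun s => decide (pvGet s "placeholder_type" "" ≠ "SLIDE_NUMBER"))).filter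
        (fun x => decide (pvPriorityA x = 0))
      = l.filter (fun s => decide (pvGet s "placeholder_type" "" = "TITLE")) := by
  rw [List.filter_filter]
  apply List.filter_congr
  intro x _
  unfold pvPriorityA
  by_cases hT : pvGet x "placeholder_type" "" = "TITLE"
  · have : pvGet x "placeholder_type" "" ≠ "SLIDE_NUMBER" := by rw [hT]; decide
    simp [hT, this]
  · by_cases hO : pvGet x "placeholder_type" "" = "OBJECT" <;> simp [hT, hO]

theorem pv_bucket1 (l : List (List (String × String))) :
    (l.filter (fun s => decide (pvGet s "placeholder_type" "" ≠ "SLIDE_NUMBER"))).filter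
        (fun x => decide (pvPriorityA x = 1))
      = l.filter (fun s => decide (pvGet s "placeholder_type" "" = "OBJECT")) := by
  rw [List.filter_filter]
  apply List.filter_congr
  intro x _
  unfold pvPriorityA
  by_cases hT : pvGet x "placeholder_type" "" = "TITLE"
  · simp [hT]
  · by_cases hO : pvGet x "placeholder_type" "" = "OBJECT"
    · have : pvGet x "placeholder_type" "" ≠ "SLIDE_NUMBER" := by rw [hO]; decide
      simp [hT, hO, this]
    · simp [hT, hO]

theorem pv_bucket2 (l : List (List (String × String))) :
    (l.filter (fun s => decide (pvGet s "placeholder_type" "" ≠ "SLIDE_NUMBER"))).filter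
        (fun x => decide (pvPriorityA x = 2))
      = l.filter (fun s => decide (pvGet s "placeholder_type" "" ≠ "SLIDE_NUMBER" ∧
            pvGet s "placeholder_type" "" ≠ "TITLE" ∧ pvGet s "placeholder_type" "" ≠ "OBJECT")) := by
  rw [List.filter_filter]
  apply List.filter_congr
  intro x _
  unfold pvPriorityA
  by_cases hT : pvGet x "placeholder_type" "" = "TITLE" <;>
    by_cases hO : pvGet x "placeholder_type" "" = "OBJECT" <;>
      by_cases hS : pvGet x "placeholder_type" "" = "SLIDE_NUMBER" <;>
        simp [hT, hO, hS]

-- ===== VERDICT (by name: the statement is the Claim_ definition above) =====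
theorem filter_content_shapes_py_spec : Claim_equal_filter_content_shapes_py := by
  intro slide_data _
  unfold Spec_filter_content_shapes_py filter_content_shapes_py filter_content_shapes_py_alt
  dsimp only
  rw [PySem.List.foldl_append_ite_eq_filter, List.nil_append,
      PySem.List.sorted_eq_foldl_insertBy]
  have hA := pv_foldA_inv
    ((PySem.Dict.getD (PySem.Dict.mk slide_data) "shapes" []).filter
      (fun s => decide (pvGet s "placeholder_type" "" ≠ "SLIDE_NUMBER")))
    [] [] [] (by simp) (by simp) (by simp)
  simp only [List.nil_append, List.append_nil] at hA
  rw [hA, pv_foldB_inv, pv_bucket0, pv_bucket1, pv_bucket2]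
  simp
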